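-- pv_equiv track=rewrite | github.com/honestman9527/novel-studio | skills/ns-memory/scripts/apply_chapter_backwrite.py | remove_sections_with_marker
-- ===== SOURCE A (Python) =====
-- def remove_sections_with_marker(text: str, heading_token: str, marker: str) -> tuple[str, int]:
--     lines = text.splitlines(keepends=True)
--     result = []
--     removed = 0
--     index = 0
--     while index < len(lines):
--         line = lines[index]
--         if line.startswith("## ") and heading_token in line:
--             end = index + 1
--             while end < len(lines) and not lines[end].startswith("## "):
--                 end += 1
--             block = "".join(lines[index:end])
--             if marker in block:
--                 removed += 1
--                 index = end
--                 continue
--         result.append(line)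
--         index += 1
--     return "".join(result), removed
-- ===== SOURCE B (Python) =====
-- def remove_sections_with_marker(text: str, heading_token: str, marker: str) -> tuple[str, int]:
--     lines = text.splitlines(keepends=True)
--     # pass 1: partition into blocks; a new block starts at every '## ' heading
--     blocks = []
--     cur = []
--     for line in lines:
--         if line.startswith("## "):
--             if cur:
--                 blocks.append(cur)
--             cur = [line]
--         else:
--             cur.append(line)
--     if cur:
--         blocks.append(cur)
--     # pass 2: keep every block that is not a marked section
--     def doomed(b):
--         return b[0].startswith("## ") and heading_token in b[0] and marker in "".join(b)
--     kept = [b for b in blocks if not doomed(b)]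
--     removed = len(blocks) - len(kept)
--     return "".join("".join(b) for b in kept), removed
-- ===== Notes on version B (the rewrite author's own statement) =====
-- stated objective: alternative
-- what changed: Replaces the index-skipping while-loop (with an inner scan-ahead and 'continue') by a two-pass group-then-filter pipeline: one pass partitions the keepends line list into blocks at '## ' headings, a second pass drops and counts the marked blocks and joins the rest.
import Mathlib
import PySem

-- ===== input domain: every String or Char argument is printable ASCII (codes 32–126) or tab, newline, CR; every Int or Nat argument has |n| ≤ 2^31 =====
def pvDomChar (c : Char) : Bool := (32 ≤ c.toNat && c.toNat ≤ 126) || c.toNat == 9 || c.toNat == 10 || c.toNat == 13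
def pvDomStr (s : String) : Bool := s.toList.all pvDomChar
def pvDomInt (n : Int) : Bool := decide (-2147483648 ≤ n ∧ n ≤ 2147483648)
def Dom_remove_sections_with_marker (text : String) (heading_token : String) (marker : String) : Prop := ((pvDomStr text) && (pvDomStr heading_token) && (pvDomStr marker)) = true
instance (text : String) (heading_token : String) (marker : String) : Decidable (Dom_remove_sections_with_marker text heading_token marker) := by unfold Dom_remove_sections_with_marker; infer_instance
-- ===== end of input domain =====

-- B replaces A's index-skipping while-loop by a two-pass group-then-filter pipeline (alternative decomposition, same cost).


-- shared helper: text.splitlines(keepends=True), ported by hand (PySem.Chars.splitlines drops the ends).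
-- Exact on the Dom alphabet, whose only line boundaries are '\n', '\r\n' and '\r'.
def pvSplitKE (acc : List Char) : List Char → List (List Char)
  | [] => if acc.isEmpty then [] else [acc.reverse]
  | '\r' :: '\n' :: rest => (acc.reverse ++ ['\r', '\n']) :: pvSplitKE [] rest
  | '\r' :: rest => (acc.reverse ++ ['\r']) :: pvSplitKE [] rest
  | '\n' :: rest => (acc.reverse ++ ['\n']) :: pvSplitKE [] rest
  | c :: rest => pvSplitKE (c :: acc) rest

-- ===== PORT A =====
-- inner while loop of A: scan ahead over non-'## ' lines; returns (lines[index+1:end], lines[end:])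
def pvTakeNB : List (List Char) → List (List Char) × List (List Char)
  | [] => ([], [])
  | l :: rest =>
    if PySem.Chars.startswith l ['#', '#', ' '] then ([], l :: rest)
    else
      let p := pvTakeNB rest
      (l :: p.1, p.2)

theorem pvTakeNB_snd_length_le (ls : List (List Char)) : (pvTakeNB ls).2.length ≤ ls.length := by
  induction ls with
  | nil => simp [pvTakeNB]
  | cons l rest ih =>
    simp only [pvTakeNB]
    split
    · simp
    · simpa using Nat.le_succ_of_le ih

-- A's outer while loop over the index, as recursion on the suffix of lines
def pvLoopA (tok mk : List Char) : List (List Char) → List (List Char) × Int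
  | [] => ([], 0)
  | l :: rest =>
    if PySem.Chars.startswith l ['#', '#', ' '] && PySem.Chars.isIn tok l then
      let p := pvTakeNB rest
      if PySem.Chars.isIn mk (PySem.Chars.join [] (l :: p.1)) then
        let q := pvLoopA tok mk p.2
        (q.1, q.2 + 1)
      else
        let q := pvLoopA tok mk rest
        (l :: q.1, q.2)
    else
      let q := pvLoopA tok mk rest
      (l :: q.1, q.2)
termination_by ls => ls.length
decreasing_by
  · exact Nat.lt_succ_of_le (pvTakeNB_snd_length_le rest)
  · exact Nat.lt_succ_self _
  · exact Nat.lt_succ_self _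

def remove_sections_with_marker (text : String) (heading_token : String) (marker : String) : String × Int :=
  let lines := pvSplitKE [] text.toList
  let r := pvLoopA heading_token.toList marker.toList lines
  (String.mk (PySem.Chars.join [] r.1), r.2)

-- ===== PORT B =====
-- pass 1 of B: partition the lines into blocks, a new block starting at every '## ' heading
def pvGroupGo (cur : List (List Char)) (acc : List (List (List Char))) : List (List Char) → List (List (List Char))
  | [] => if cur.isEmpty then acc else acc ++ [cur]
  | l :: rest =>
    if PySem.Chars.startswith l ['#', '#', ' '] then
      if cur.isEmpty then pvGroupGo [l] acc rest
      else pvGroupGo [l] (acc ++ [cur]) rest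
    else pvGroupGo (cur ++ [l]) acc rest

-- pass 2 predicate of B: a block to be dropped
def pvDoomedB (tok mk : List Char) (b : List (List Char)) : Bool :=
  match b with
  | [] => false
  | h :: _ => PySem.Chars.startswith h ['#', '#', ' '] &&
      (PySem.Chars.isIn tok h && PySem.Chars.isIn mk (PySem.Chars.join [] b))

def remove_sections_with_marker_alt (text : String) (heading_token : String) (marker : String) : String × Int :=
  let lines := pvSplitKE [] text.toList
  let blocks := pvGroupGo [] [] lines
  let kept := blocks.filter (fun b => !pvDoomedB heading_token.toList marker.toList b)
  (String.mk (PySem.Chars.join [] (kept.map (fun b => PySem.Chars.join [] b))),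
   (blocks.length : Int) - (kept.length : Int))

-- ===== PRECONDITION & SPEC =====
def Spec_remove_sections_with_marker (text : String) (heading_token : String) (marker : String) (out : String × Int) : Prop := out = remove_sections_with_marker_alt text heading_token marker
instance (text : String) (heading_token : String) (marker : String) (out : String × Int) : Decidable (Spec_remove_sections_with_marker text heading_token marker out) := by unfold Spec_remove_sections_with_marker; infer_instance

-- ===== CLAIM (what is proved, stated in full; the proofs are below) =====
def Claim_equal_remove_sections_with_marker : Prop := ∀ (text : String) (heading_token : String) (marker : String), Dom_remove_sections_with_marker text heading_token marker → Spec_remove_sections_with_marker text heading_token marker (remove_sections_with_marker text heading_token marker)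

-- ===== LEMMAS AND PROOFS =====

-- canonical (right-fold) block grouping, used only in the proofs
def pvG : List (List Char) → List (List (List Char))
  | [] => []
  | l :: rest =>
    match pvG rest with
    | [] => [[l]]
    | b :: bs =>
      match b with
      | [] => [l] :: bs
      | h :: t =>
        if PySem.Chars.startswith h ['#', '#', ' '] then [l] :: (h :: t) :: bs
        else (l :: h :: t) :: bs

def pvNH (l : List Char) : Bool := !PySem.Chars.startswith l ['#', '#', ' ']

theorem pvTakeNB_eq (ls : List (List Char)) :
    pvTakeNB ls = (ls.takeWhile pvNH, ls.dropWhile pvNH) := by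
  induction ls with
  | nil => simp [pvTakeNB]
  | cons l rest ih =>
    simp only [pvTakeNB, List.takeWhile, List.dropWhile, pvNH, ih]
    cases h : PySem.Chars.startswith l ['#', '#', ' '] <;> simp

theorem pvG_cons (rest : List (List Char)) : ∀ l,
    pvG (l :: rest) = (l :: rest.takeWhile pvNH) :: pvG (rest.dropWhile pvNH) := by
  induction rest with
  | nil => intro l; simp [pvG]
  | cons r rs ih =>
    intro l
    rw [pvG.eq_2, ih r, List.takeWhile, List.dropWhile]
    simp only [pvNH]
    cases h : PySem.Chars.startswith r ['#', '#', ' '] <;> simp [h, ih r]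

-- merging a pending current block into the canonical grouping
def pvMerge (cur : List (List Char)) (blocks : List (List (List Char))) : List (List (List Char)) :=
  if cur.isEmpty then blocks
  else
    match blocks with
    | [] => [cur]
    | b :: bs =>
      match b with
      | [] => cur :: bs
      | h :: t =>
        if PySem.Chars.startswith h ['#', '#', ' '] then cur :: (h :: t) :: bs
        else (cur ++ h :: t) :: bs

theorem pvMerge_single (l : List Char) (rest : List (List Char)) :
    pvMerge [l] (pvG rest) = pvG (l :: rest) := by
  rw [pvG.eq_2]
  cases hb : pvG rest with
  | nil => simp [pvMerge]
  | cons b bs =>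
    cases b with
    | nil => simp [pvMerge]
    | cons h t => by_cases hh : PySem.Chars.startswith h ['#', '#', ' '] = true <;> simp [pvMerge, hh]

theorem pvGroupGo_eq (ls : List (List Char)) : ∀ cur acc,
    pvGroupGo cur acc ls = acc ++ pvMerge cur (pvG ls) := by
  induction ls with
  | nil =>
    intro cur acc
    cases cur <;> simp [pvGroupGo, pvG, pvMerge]
  | cons l rest ih =>
    intro cur acc
    rw [pvGroupGo.eq_2]
    by_cases hl : PySem.Chars.startswith l ['#', '#', ' '] = true
    · cases cur with
      | nil =>
        rw [if_pos hl]
        simp only [List.isEmpty_nil, if_pos rfl]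
        rw [ih, pvMerge_single]
        simp [pvMerge]
      | cons c cs =>
        rw [if_pos hl]
        simp only [List.isEmpty_cons, if_neg (by simp : ¬((false : Bool) = true))]
        rw [ih, pvMerge_single, pvG_cons]
        simp [pvMerge, hl]
    · have hl' : PySem.Chars.startswith l ['#', '#', ' '] = false := by
        cases h : PySem.Chars.startswith l ['#', '#', ' '] <;> simp_all
      rw [if_neg (by simp [hl'])]
      rw [ih]
      congr 1
      -- pvMerge (cur ++ [l]) (pvG rest) = pvMerge cur (pvG (l :: rest))
      cases rest with
      | nil => cases cur <;> simp [pvG, pvMerge, hl']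
      | cons r rs =>
        rw [pvG_cons, pvG_cons, List.takeWhile, List.dropWhile]
        simp only [pvNH]
        by_cases hr : PySem.Chars.startswith r ['#', '#', ' '] = true
        · simp only [hr]
          cases cur <;> simp [pvMerge, hl', hr, pvG_cons]
        · have hr' : PySem.Chars.startswith r ['#', '#', ' '] = false := by
            cases h : PySem.Chars.startswith r ['#', '#', ' '] <;> simp_all
          simp only [hr']
          cases cur <;> simp [pvMerge, hl', hr']

-- skipping a run of non-heading lines just appends them
theorem pvLoopA_skip (tok mk : List Char) (tw : List (List Char))
    (h : ∀ x ∈ tw, PySem.Chars.startswith x ['#', '#', ' '] = false) (rst : List (List Char)) :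
    pvLoopA tok mk (tw ++ rst) =
      ((tw ++ (pvLoopA tok mk rst).1), (pvLoopA tok mk rst).2) := by
  induction tw with
  | nil => simp
  | cons x xs ih =>
    have hx := h x (by simp)
    have hxs : ∀ y ∈ xs, PySem.Chars.startswith y ['#', '#', ' '] = false := by
      intro y hy; exact h y (by simp [hy])
    simp [pvLoopA, hx, ih hxs]

theorem pvJoin_nil_eq_flatten (parts : List (List Char)) :
    PySem.Chars.join [] parts = parts.flatten := by
  induction parts with
  | nil => rfl
  | cons p ps ih =>
    cases ps with
    | nil => simp [PySem.Chars.join, List.intercalate]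
    | cons q qs =>
      rw [PySem.Chars.join_cons_cons]
      simp_all

theorem pvLoopA_eq_main (tok mk : List Char) : ∀ n (ls : List (List Char)), ls.length ≤ n →
    pvLoopA tok mk ls =
      (((pvG ls).filter (fun b => !pvDoomedB tok mk b)).flatten,
       (((pvG ls).filter (fun b => pvDoomedB tok mk b)).length : Int)) := by
  intro n
  induction n with
  | zero =>
    intro ls h
    have : ls = [] := List.eq_nil_of_length_eq_zero (Nat.le_zero.mp h)
    subst this
    simp [pvLoopA, pvG]
  | succ n ih =>
    intro ls h
    cases ls with
    | nil => simp [pvLoopA, pvG]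
    | cons l rest =>
      have htw : ∀ x ∈ rest.takeWhile pvNH, PySem.Chars.startswith x ['#', '#', ' '] = false := by
        intro x hx
        have := List.mem_takeWhile_imp hx
        simpa [pvNH] using this
      have hdw_le : (rest.dropWhile pvNH).length ≤ n :=
        le_trans (List.length_dropWhile_le _ _) (Nat.succ_le_succ_iff.mp h)
      have hrest : rest.takeWhile pvNH ++ rest.dropWhile pvNH = rest :=
        List.takeWhile_append_dropWhile
      rw [pvG_cons, pvLoopA.eq_2, pvTakeNB_eq]
      by_cases h1 : (PySem.Chars.startswith l ['#', '#', ' '] && PySem.Chars.isIn tok l) = true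
      · have ha : PySem.Chars.startswith l ['#', '#', ' '] = true := by
          simpa using (Bool.and_eq_true_iff.mp h1).1
        have hb : PySem.Chars.isIn tok l = true := by
          simpa using (Bool.and_eq_true_iff.mp h1).2
        by_cases h2 : PySem.Chars.isIn mk (PySem.Chars.join [] (l :: rest.takeWhile pvNH)) = true
        · -- block dropped and counted
          rw [if_pos h1]
          simp only [if_pos h2]
          rw [ih _ hdw_le]
          have hd : pvDoomedB tok mk (l :: rest.takeWhile pvNH) = true := by
            simp [pvDoomedB, ha, hb, h2]
          simp [List.filter_cons, hd]
        · -- heading kept, marker absent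
          rw [if_pos h1]
          simp only [if_neg h2]
          rw [← hrest, pvLoopA_skip tok mk _ htw, ih _ hdw_le]
          have hd : pvDoomedB tok mk (l :: rest.takeWhile pvNH) = false := by
            simp only [pvDoomedB, ha, Bool.true_and, hb]
            simpa using h2
          simp [List.filter_cons, hd]
      · -- not a qualifying heading: line kept
        rw [if_neg h1]
        rw [← hrest, pvLoopA_skip tok mk _ htw, ih _ hdw_le]
        have hd : pvDoomedB tok mk (l :: rest.takeWhile pvNH) = false := by
          simp only [pvDoomedB]
          cases hs : PySem.Chars.startswith l ['#', '#', ' '] with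
          | false => simp
          | true =>
            cases hi : PySem.Chars.isIn tok l with
            | false => simp
            | true => exact absurd (by simp [hs, hi]) h1
        simp [List.filter_cons, hd]

theorem pvFilter_length_int {α : Type} (p : α → Bool) (L : List α) :
    ((L.filter p).length : Int) = (L.length : Int) - ((L.filter (fun b => !p b)).length : Int) := by
  induction L with
  | nil => simp
  | cons x xs ih =>
    cases hx : p x <;> simp [List.filter_cons, hx, ih] <;> omega

-- ===== VERDICT (by name: the statement is the Claim_ definition above) =====
theorem remove_sections_with_marker_spec : Claim_equal_remove_sections_with_marker := by
  unfold Claim_equal_remove_sections_with_marker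
  intro text heading_token marker _
  unfold Spec_remove_sections_with_marker
  unfold remove_sections_with_marker remove_sections_with_marker_alt
  simp only [pvGroupGo_eq, pvMerge, List.isEmpty_nil, if_pos rfl, List.nil_append]
  rw [pvLoopA_eq_main heading_token.toList marker.toList
      (pvSplitKE [] text.toList).length _ (le_refl _)]
  rw [Prod.mk.injEq]
  constructor
  · -- the joined text agrees
    congr 1
    rw [pvJoin_nil_eq_flatten, pvJoin_nil_eq_flatten, List.flatten_flatten]
    congr 1
    simp [Function.comp, pvJoin_nil_eq_flatten]
  · -- the removed count agrees
    exact pvFilter_length_int _ _
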